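-- pv_equiv track=rewrite | github.com/Soureus/FERI-AI_Minimax | utils.py | magic_sets_from_board
-- ===== SOURCE A (Python) =====
-- def magic_sets_from_board(board: list[list[str]], player_one: str, player_two:str)-> dict[str, set[int]]:
--     magic = [4, 9, 2, 3, 5, 7, 8, 1, 6]
--     sets = {player_one: set(), player_two: set()}
--     for row in range(3):
--         for col in range(3):
--             sym = board[row][col]
--             if sym in sets:
--                 idx = row * 3 + col
--                 sets[sym].add(magic[idx])
--     return sets
-- ===== SOURCE B (Python) =====
-- def magic_sets_from_board(board: list[list[str]], player_one: str, player_two: str) -> dict[str, set[int]]: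
--     magic = [4, 9, 2, 3, 5, 7, 8, 1, 6]
--     result = {}
--     for player in (player_one, player_two):
--         nums = set()
--         for idx in range(9):
--             if board[idx // 3][idx % 3] == player:
--                 nums.add(magic[idx])
--         result[player] = nums
--     return result
-- ===== Notes on version B (the rewrite author's own statement) =====
-- stated objective: alternative
-- what changed: A makes one sweep over the 9 cells, dispatching each cell's symbol into a pre-keyed dict of mutable sets; B instead loops over the two players and gives each its own independent scan of the 9 cells (flat 0..8 index with divmod), collecting that player's magic numbers.
import Mathlib
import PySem

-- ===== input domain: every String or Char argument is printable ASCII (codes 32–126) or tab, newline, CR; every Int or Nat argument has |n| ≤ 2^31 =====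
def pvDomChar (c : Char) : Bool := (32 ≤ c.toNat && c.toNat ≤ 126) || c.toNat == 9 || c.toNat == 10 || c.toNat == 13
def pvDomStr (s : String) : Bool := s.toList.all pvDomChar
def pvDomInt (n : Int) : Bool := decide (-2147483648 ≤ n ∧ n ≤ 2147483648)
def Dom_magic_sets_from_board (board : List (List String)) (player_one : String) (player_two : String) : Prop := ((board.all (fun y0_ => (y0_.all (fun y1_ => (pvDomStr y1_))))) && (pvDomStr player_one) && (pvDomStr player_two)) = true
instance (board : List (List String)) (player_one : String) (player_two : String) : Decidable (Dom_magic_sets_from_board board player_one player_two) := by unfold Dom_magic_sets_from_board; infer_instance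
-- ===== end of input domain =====

-- B replaces A's single symbol-dispatching sweep (dict membership + in-place set mutation per cell)
-- by one independent 9-cell scan per player (outer loop over the two players); same return value.

-- ===== PORT A =====
def magic_sets_from_board (board : List (List String)) (player_one : String) (player_two : String) : List (String × List Int) :=
  let magic : List Int := [4, 9, 2, 3, 5, 7, 8, 1, 6]
  let sets : PySem.Dict String (PySem.Set Int) :=
    (PySem.Dict.empty.insert player_one PySem.Set.empty).insert player_two PySem.Set.empty
  let final :=
    (PySem.List.pyRange 0 3 1).foldl (fun d row =>
      (PySem.List.pyRange 0 3 1).foldl (fun d col =>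
        -- sym = board[row][col]; none = IndexError, excluded by Pre_
        match (PySem.List.pyGet? board row).bind (fun r => PySem.List.pyGet? r col) with
        | none => d
        | some sym =>
          if d.contains sym then
            -- sets[sym].add(magic[idx]); idx = row*3+col is always in range for the 9-element magic list
            d.modify sym PySem.Set.empty (fun s => s.add (PySem.List.pyGetD magic (row * 3 + col) 0))
          else d) d) sets
  final.items

-- ===== PORT B =====
def magic_sets_from_board_alt (board : List (List String)) (player_one : String) (player_two : String) : List (String × List Int) :=
  let magic : List Int := [4, 9, 2, 3, 5, 7, 8, 1, 6]
  let scan : String → PySem.Set Int := fun player =>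
    (PySem.List.pyRange 0 9 1).foldl (fun nums idx =>
      -- board[idx // 3][idx % 3]; none = IndexError, excluded by Pre_
      match (PySem.List.pyGet? board (PySem.Int.floordiv idx 3)).bind
              (fun r => PySem.List.pyGet? r (PySem.Int.mod idx 3)) with
      | none => nums
      | some sym => if sym == player then nums.add (PySem.List.pyGetD magic idx 0) else nums)
      PySem.Set.empty
  ([player_one, player_two].foldl (fun d p => d.insert p (scan p)) PySem.Dict.empty).items

-- ===== PRECONDITION & SPEC =====
-- Pre_ excludes exactly the boards on which A raises IndexError (fewer than 3 rows, or one of the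
-- first 3 rows shorter than 3); on every such board A (and B) raises, so nothing A returns is excluded.
def Pre_magic_sets_from_board (board : List (List String)) (player_one : String) (player_two : String) : Prop :=
  3 ≤ board.length ∧ ∀ r ∈ board.take 3, 3 ≤ r.length
instance (board : List (List String)) (player_one : String) (player_two : String) : Decidable (Pre_magic_sets_from_board board player_one player_two) := by unfold Pre_magic_sets_from_board; infer_instance

def pvWitness_magic_sets_from_board : List (List String) × String × String :=
  ([["X", "O", "X"], ["O", "X", ""], ["X", "", "O"]], "X", "O")

def Spec_magic_sets_from_board (board : List (List String)) (player_one : String) (player_two : String) (out : List (String × List Int)) : Prop := out = magic_sets_from_board_alt board player_one player_two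
instance (board : List (List String)) (player_one : String) (player_two : String) (out : List (String × List Int)) : Decidable (Spec_magic_sets_from_board board player_one player_two out) := by unfold Spec_magic_sets_from_board; infer_instance

-- ===== CLAIM (what is proved, stated in full; the proofs are below) =====
def Claim_equal_magic_sets_from_board : Prop := ∀ (board : List (List String)) (player_one : String) (player_two : String), Dom_magic_sets_from_board board player_one player_two → Pre_magic_sets_from_board board player_one player_two → Spec_magic_sets_from_board board player_one player_two (magic_sets_from_board board player_one player_two)

-- ===== LEMMAS AND PROOFS =====

-- One loop step of A's sweep, on a (symbol, magic value) cell.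
def msStep (d : PySem.Dict String (PySem.Set Int)) (c : String × Int) : PySem.Dict String (PySem.Set Int) :=
  if d.contains c.1 then d.modify c.1 PySem.Set.empty (fun s => s.add c.2) else d

-- One loop step of B's per-player scan.
def msAdd (p : String) (s : PySem.Set Int) (c : String × Int) : PySem.Set Int :=
  if c.1 == p then s.add c.2 else s

-- The nine (symbol, magic value) cells of a board, in both programs' traversal order.
def msCells (a b c d e f g h i : String) : List (String × Int) :=
  [(a,4),(b,9),(c,2),(d,3),(e,5),(f,7),(g,8),(h,1),(i,6)]

theorem pyGet?_cons0 {α : Type} (x : α) (t : List α) : PySem.List.pyGet? (x::t) 0 = some x := by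
  simp [pysem]
theorem pyGet?_cons1 {α : Type} (x y : α) (t : List α) : PySem.List.pyGet? (x::y::t) 1 = some y := by
  simp [pysem]
theorem pyGet?_cons2 {α : Type} (x y z : α) (t : List α) : PySem.List.pyGet? (x::y::z::t) 2 = some z := by
  simp [pysem]
theorem optBindSome {A B : Type} (x : A) (f : A → Option B) : (some x).bind f = f x := rfl
theorem msStep_fold (d : PySem.Dict String (PySem.Set Int)) (s : String) (m : Int) :
    (if d.contains s then d.modify s PySem.Set.empty (fun t => t.add m) else d) = msStep d (s, m) := rfl
theorem msAdd_fold (p : String) (s : PySem.Set Int) (sym : String) (m : Int) :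
    (if sym == p then s.add m else s) = msAdd p s (sym, m) := rfl

-- A's sweep over a dict holding two distinct keys acts independently on the two sets.
theorem inv2 (p1 p2 : String) (h : p1 ≠ p2) (cs : List (String × Int)) :
    ∀ (s1 s2 : PySem.Set Int),
    cs.foldl msStep (PySem.Dict.mk [(p1, s1), (p2, s2)])
      = PySem.Dict.mk [(p1, cs.foldl (msAdd p1) s1), (p2, cs.foldl (msAdd p2) s2)] := by
  induction cs with
  | nil => intro s1 s2; rfl
  | cons c cs ih =>
    intro s1 s2
    obtain ⟨sym, m⟩ := c
    by_cases h1 : sym = p1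
    · subst h1
      simp [List.foldl, msStep, msAdd, PySem.Dict.contains, PySem.Dict.modify, PySem.Dict.insert,
        PySem.Dict.getD, PySem.Dict.get?, h, Ne.symm h, ih]
    · by_cases h2 : sym = p2
      · subst h2
        simp [List.foldl, msStep, msAdd, PySem.Dict.contains, PySem.Dict.modify, PySem.Dict.insert,
          PySem.Dict.getD, PySem.Dict.get?, h, h1, ih]
      · simp [List.foldl, msStep, msAdd, PySem.Dict.contains, h1, h2, Ne.symm h1, Ne.symm h2, ih]

-- Same for the one-key dict arising when player_one == player_two.
theorem inv1 (p1 : String) (cs : List (String × Int)) :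
    ∀ (s1 : PySem.Set Int),
    cs.foldl msStep (PySem.Dict.mk [(p1, s1)])
      = PySem.Dict.mk [(p1, cs.foldl (msAdd p1) s1)] := by
  induction cs with
  | nil => intro s1; rfl
  | cons c cs ih =>
    intro s1
    obtain ⟨sym, m⟩ := c
    by_cases h1 : sym = p1
    · subst h1
      simp [List.foldl, msStep, msAdd, PySem.Dict.contains, PySem.Dict.modify, PySem.Dict.insert,
        PySem.Dict.getD, PySem.Dict.get?, ih]
    · simp [List.foldl, msStep, msAdd, PySem.Dict.contains, h1, Ne.symm h1, ih]

-- On a board with its first 3 rows and columns exposed, A is the msStep-fold over the nine cells.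
theorem portA_eq (a b c d e f g h i : String) (t0 t1 t2 : List String) (rest : List (List String)) (p1 p2 : String) :
    magic_sets_from_board ((a::b::c::t0)::(d::e::f::t1)::(g::h::i::t2)::rest) p1 p2
      = (List.foldl msStep ((PySem.Dict.empty.insert p1 PySem.Set.empty).insert p2 PySem.Set.empty)
          (msCells a b c d e f g h i)).items := by
  simp only [magic_sets_from_board, msCells, show PySem.List.pyRange 0 3 1 = [0,1,2] from by decide,
    List.foldl, pyGet?_cons0, pyGet?_cons1, pyGet?_cons2, optBindSome,
    show PySem.List.pyGetD [(4:Int),9,2,3,5,7,8,1,6] (0*3+0) 0 = 4 from by decide,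
    show PySem.List.pyGetD [(4:Int),9,2,3,5,7,8,1,6] (0*3+1) 0 = 9 from by decide,
    show PySem.List.pyGetD [(4:Int),9,2,3,5,7,8,1,6] (0*3+2) 0 = 2 from by decide,
    show PySem.List.pyGetD [(4:Int),9,2,3,5,7,8,1,6] (1*3+0) 0 = 3 from by decide,
    show PySem.List.pyGetD [(4:Int),9,2,3,5,7,8,1,6] (1*3+1) 0 = 5 from by decide,
    show PySem.List.pyGetD [(4:Int),9,2,3,5,7,8,1,6] (1*3+2) 0 = 7 from by decide,
    show PySem.List.pyGetD [(4:Int),9,2,3,5,7,8,1,6] (2*3+0) 0 = 8 from by decide,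
    show PySem.List.pyGetD [(4:Int),9,2,3,5,7,8,1,6] (2*3+1) 0 = 1 from by decide,
    show PySem.List.pyGetD [(4:Int),9,2,3,5,7,8,1,6] (2*3+2) 0 = 6 from by decide,
    msStep_fold]

-- Same exposure for B: each per-player scan is the msAdd-fold over the same nine cells.
theorem portB_eq (a b c d e f g h i : String) (t0 t1 t2 : List String) (rest : List (List String)) (p1 p2 : String) :
    magic_sets_from_board_alt ((a::b::c::t0)::(d::e::f::t1)::(g::h::i::t2)::rest) p1 p2
      = (([p1, p2].foldl
            (fun dd p => dd.insert p (List.foldl (msAdd p) PySem.Set.empty (msCells a b c d e f g h i)))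
            PySem.Dict.empty)).items := by
  simp only [magic_sets_from_board_alt, msCells, show PySem.List.pyRange 0 9 1 = [0,1,2,3,4,5,6,7,8] from by decide,
    List.foldl,
    show PySem.Int.floordiv 0 3 = 0 from by decide, show PySem.Int.mod 0 3 = 0 from by decide,
    show PySem.Int.floordiv 1 3 = 0 from by decide, show PySem.Int.mod 1 3 = 1 from by decide,
    show PySem.Int.floordiv 2 3 = 0 from by decide, show PySem.Int.mod 2 3 = 2 from by decide,
    show PySem.Int.floordiv 3 3 = 1 from by decide, show PySem.Int.mod 3 3 = 0 from by decide,
    show PySem.Int.floordiv 4 3 = 1 from by decide, show PySem.Int.mod 4 3 = 1 from by decide,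
    show PySem.Int.floordiv 5 3 = 1 from by decide, show PySem.Int.mod 5 3 = 2 from by decide,
    show PySem.Int.floordiv 6 3 = 2 from by decide, show PySem.Int.mod 6 3 = 0 from by decide,
    show PySem.Int.floordiv 7 3 = 2 from by decide, show PySem.Int.mod 7 3 = 1 from by decide,
    show PySem.Int.floordiv 8 3 = 2 from by decide, show PySem.Int.mod 8 3 = 2 from by decide,
    pyGet?_cons0, pyGet?_cons1, pyGet?_cons2, optBindSome,
    show PySem.List.pyGetD [(4:Int),9,2,3,5,7,8,1,6] 0 0 = 4 from by decide,
    show PySem.List.pyGetD [(4:Int),9,2,3,5,7,8,1,6] 1 0 = 9 from by decide,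
    show PySem.List.pyGetD [(4:Int),9,2,3,5,7,8,1,6] 2 0 = 2 from by decide,
    show PySem.List.pyGetD [(4:Int),9,2,3,5,7,8,1,6] 3 0 = 3 from by decide,
    show PySem.List.pyGetD [(4:Int),9,2,3,5,7,8,1,6] 4 0 = 5 from by decide,
    show PySem.List.pyGetD [(4:Int),9,2,3,5,7,8,1,6] 5 0 = 7 from by decide,
    show PySem.List.pyGetD [(4:Int),9,2,3,5,7,8,1,6] 6 0 = 8 from by decide,
    show PySem.List.pyGetD [(4:Int),9,2,3,5,7,8,1,6] 7 0 = 1 from by decide,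
    show PySem.List.pyGetD [(4:Int),9,2,3,5,7,8,1,6] 8 0 = 6 from by decide,
    msAdd_fold]

-- The two sides agree on every exposed board.
theorem main_eq (a b c d e f g h i : String) (t0 t1 t2 : List String) (rest : List (List String)) (p1 p2 : String) :
    magic_sets_from_board ((a::b::c::t0)::(d::e::f::t1)::(g::h::i::t2)::rest) p1 p2
      = magic_sets_from_board_alt ((a::b::c::t0)::(d::e::f::t1)::(g::h::i::t2)::rest) p1 p2 := by
  rw [portA_eq, portB_eq]
  by_cases hpp : p1 = p2
  · subst hpp
    have hinit : (PySem.Dict.empty.insert p1 (PySem.Set.empty : PySem.Set Int)).insert p1 PySem.Set.empty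
        = PySem.Dict.mk [(p1, (PySem.Set.empty : PySem.Set Int))] := by
      simp [PySem.Dict.insert, PySem.Dict.contains, PySem.Dict.empty]
    rw [hinit, inv1]
    simp [List.foldl, PySem.Dict.insert, PySem.Dict.contains, PySem.Dict.empty]
  · have hinit : (PySem.Dict.empty.insert p1 (PySem.Set.empty : PySem.Set Int)).insert p2 PySem.Set.empty
        = PySem.Dict.mk [(p1, (PySem.Set.empty : PySem.Set Int)), (p2, PySem.Set.empty)] := by
      simp [PySem.Dict.insert, PySem.Dict.contains, PySem.Dict.empty, hpp]
    rw [hinit, inv2 p1 p2 hpp]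
    simp [List.foldl, PySem.Dict.insert, PySem.Dict.contains, PySem.Dict.empty, hpp]

-- ===== VERDICT (by name: the statement is the Claim_ definition above) =====
theorem magic_sets_from_board_spec : Claim_equal_magic_sets_from_board := by
  intro board p1 p2 _ hpre
  obtain ⟨hlen, hrows⟩ := hpre
  match board, hlen with
  | (r0 :: r1 :: r2 :: rest), _ =>
    have h0 : 3 ≤ r0.length := hrows r0 (by simp)
    have h1 : 3 ≤ r1.length := hrows r1 (by simp)
    have h2 : 3 ≤ r2.length := hrows r2 (by simp)
    match r0, h0, r1, h1, r2, h2 with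
    | (a :: b :: c :: t0), _, (d :: e :: f :: t1), _, (g :: h :: i :: t2), _ =>
      exact main_eq a b c d e f g h i t0 t1 t2 rest p1 p2
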